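-- pv_equiv track=rewrite | github.com/nemethbalaazs/SOE_Prog1_PY | 2026/orai_anyagok/4. hét/megoldas/20_histogram.py | histogram_rosszul
-- ===== SOURCE A (Python) =====
-- def histogram_rosszul(values):
--     bins = {"0-49": 0, "50-59": 0, "60-69": 0, "70-79": 0, "80-89": 0, "90-100": 0}
--     for s in values:
--         if s < 50:
--             bins["0-49"] += 1
--         elif s < 60:
--             bins["50-59"] += 1
--         elif s < 70:
--             bins["60-69"] += 1
--         elif s < 80:
--             bins["70-79"] += 1
--         elif s < 90:
--             bins["80-89"] += 1
--         else:
--             bins["90-100"] += 1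
--     return bins
-- ===== SOURCE B (Python) =====
-- def histogram_rosszul(values):
--     bounds = [50, 60, 70, 80, 90]
--     labels = ["0-49", "50-59", "60-69", "70-79", "80-89", "90-100"]
--     bins = {lab: 0 for lab in labels}
--     for s in values:
--         # bisect_right over bounds, hand-written (A imports nothing, so no bisect module)
--         lo, hi = 0, len(bounds)
--         while lo < hi:
--             mid = (lo + hi) // 2
--             if s < bounds[mid]:
--                 hi = mid
--             else:
--                 lo = mid + 1
--         bins[labels[lo]] += 1
--     return bins
-- ===== Notes on version B (the rewrite author's own statement) =====
-- stated objective: alternative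
-- what changed: Replaces the if/elif boundary cascade with a hand-written binary search (bisect_right) over a boundary table plus a parallel label list, incrementing a dict pre-seeded with all six labels.
import Mathlib
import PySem

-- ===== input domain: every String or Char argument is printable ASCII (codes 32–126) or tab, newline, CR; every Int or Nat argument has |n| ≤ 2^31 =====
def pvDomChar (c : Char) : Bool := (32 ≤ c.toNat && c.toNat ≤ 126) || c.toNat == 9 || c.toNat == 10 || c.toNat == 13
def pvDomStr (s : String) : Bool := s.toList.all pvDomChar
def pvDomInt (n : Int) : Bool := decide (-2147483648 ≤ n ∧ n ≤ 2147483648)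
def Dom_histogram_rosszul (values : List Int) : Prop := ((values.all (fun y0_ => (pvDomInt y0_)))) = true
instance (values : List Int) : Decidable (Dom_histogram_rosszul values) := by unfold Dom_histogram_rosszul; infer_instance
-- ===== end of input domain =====

-- B replaces A's if/elif cascade by a hand-written binary search (bisect_right) over a
-- boundary table, incrementing a pre-seeded 6-key dict; objective: alternative/idiomatic.


-- ===== PORT A =====
-- literal transliteration of A: initial 6-key dict, then for each s the if/elif
-- cascade increments the matching key (dict increment = getD 0 + 1 then insert-in-place).
def hrStepA (d : PySem.Dict String Int) (s : Int) : PySem.Dict String Int :=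
  if s < 50 then d.insert "0-49" (d.getD "0-49" 0 + 1)
  else if s < 60 then d.insert "50-59" (d.getD "50-59" 0 + 1)
  else if s < 70 then d.insert "60-69" (d.getD "60-69" 0 + 1)
  else if s < 80 then d.insert "70-79" (d.getD "70-79" 0 + 1)
  else if s < 90 then d.insert "80-89" (d.getD "80-89" 0 + 1)
  else d.insert "90-100" (d.getD "90-100" 0 + 1)

def histogram_rosszul (values : List Int) : List (String × Int) :=
  let bins : PySem.Dict String Int := PySem.Dict.ofList
    [("0-49", 0), ("50-59", 0), ("60-69", 0), ("70-79", 0), ("80-89", 0), ("90-100", 0)]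
  (values.foldl hrStepA bins).items

-- ===== PORT B =====
-- literal transliteration of Source B: the while-loop binary search over `bounds`
-- (index always in range, so `getD 0` is exact), then increment labels[lo].
def hrBisect (bounds : List Int) (s : Int) (lo hi : Nat) : Nat :=
  if _h : lo < hi then
    let mid := (lo + hi) / 2
    if s < bounds.getD mid 0 then hrBisect bounds s lo mid
    else hrBisect bounds s (mid + 1) hi
  else lo
termination_by hi - lo
decreasing_by all_goals omega

def hrBounds : List Int := [50, 60, 70, 80, 90]
def hrLabels : List String := ["0-49", "50-59", "60-69", "70-79", "80-89", "90-100"]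

def hrStepB (d : PySem.Dict String Int) (s : Int) : PySem.Dict String Int :=
  let lo := hrBisect hrBounds s 0 hrBounds.length
  let key := hrLabels.getD lo ""
  d.insert key (d.getD key 0 + 1)

def histogram_rosszul_alt (values : List Int) : List (String × Int) :=
  let bins : PySem.Dict String Int := PySem.Dict.ofList (hrLabels.map (fun lab => (lab, 0)))
  (values.foldl hrStepB bins).items

-- ===== PRECONDITION & SPEC =====
def Spec_histogram_rosszul (values : List Int) (out : List (String × Int)) : Prop := out = histogram_rosszul_alt values
instance (values : List Int) (out : List (String × Int)) : Decidable (Spec_histogram_rosszul values out) := by unfold Spec_histogram_rosszul; infer_instance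

-- ===== CLAIM (what is proved, stated in full; the proofs are below) =====
def Claim_equal_histogram_rosszul : Prop := ∀ (values : List Int), Dom_histogram_rosszul values → Spec_histogram_rosszul values (histogram_rosszul values)

-- ===== LEMMAS AND PROOFS =====

-- the binary search lands on exactly the bin A's cascade picks
theorem hrBisect_eq (s : Int) :
    hrBisect hrBounds s 0 5 =
      (if s < 50 then 0 else if s < 60 then 1 else if s < 70 then 2
       else if s < 80 then 3 else if s < 90 then 4 else 5) := by
  by_cases h1 : s < 50 <;> by_cases h2 : s < 60 <;> by_cases h3 : s < 70 <;>
    by_cases h4 : s < 80 <;> by_cases h5 : s < 90 <;>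
    simp [hrBisect, hrBounds, h1, h2, h3, h4, h5] <;> omega

theorem hrStep_eq (d : PySem.Dict String Int) (s : Int) : hrStepA d s = hrStepB d s := by
  unfold hrStepA hrStepB
  rw [show hrBounds.length = 5 from rfl, hrBisect_eq]
  split_ifs <;> rfl

-- ===== VERDICT (by name: the statement is the Claim_ definition above) =====
theorem histogram_rosszul_spec : Claim_equal_histogram_rosszul := by
  intro values _
  show histogram_rosszul values = histogram_rosszul_alt values
  unfold histogram_rosszul histogram_rosszul_alt
  have hinit : PySem.Dict.ofList
      [("0-49", (0:Int)), ("50-59", 0), ("60-69", 0), ("70-79", 0), ("80-89", 0), ("90-100", 0)] =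
      PySem.Dict.ofList (hrLabels.map (fun lab => (lab, 0))) := rfl
  rw [hinit, funext fun d => funext fun s => hrStep_eq d s]
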